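-- pv_equiv track=rewrite | github.com/linzhiqin2003/FileParsing | src/file_parse_engine/parsers/spreadsheet.py | _smart_split_table
-- ===== SOURCE A (Python) =====
-- _SPLIT_THRESHOLD = 50
--
-- def _rows_to_markdown_table(rows: list[list[str]], *, title: str = "") -> str:
--     """Convert a 2D list of strings to a Markdown table."""
--     if not rows:
--         return ""
--
--     parts: list[str] = []
--     if title:
--         parts.append(f"## {title}")
--         parts.append("")
--
--     col_count = max(len(r) for r in rows)
--     normalized = [r + [""] * (col_count - len(r)) for r in rows]
--
--     header = normalized[0]
--     parts.append("| " + " | ".join(header) + " |")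
--     parts.append("| " + " | ".join("---" for _ in header) + " |")
--
--     for row in normalized[1:]:
--         parts.append("| " + " | ".join(row) + " |")
--
--     return "\n".join(parts)
--
-- def _is_category_row(cells: list[str], col_count: int) -> bool:
--     """Detect if a row is a category/section header (mostly empty except first col)."""
--     if not cells or not cells[0].strip():
--         return False
--
--     # A category row: first cell has text, most other cells are empty
--     non_empty = sum(1 for c in cells[1:] if c.strip())
--     return non_empty <= 1 and col_count > 2
--
-- def _smart_split_table(
--     rows: list[list[str]],
--     title: str,
-- ) -> list[str]:
--     """Split a large table by category rows into smaller semantic chunks."""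
--     if len(rows) <= _SPLIT_THRESHOLD:
--         return [_rows_to_markdown_table(rows, title=title)]
--
--     header = rows[0]
--     col_count = max(len(r) for r in rows)
--     chunks: list[str] = []
--     current_rows: list[list[str]] = [header]
--     current_title = title
--
--     for row in rows[1:]:
--         if _is_category_row(row, col_count) and len(current_rows) > 1:
--             # Flush current chunk
--             chunks.append(_rows_to_markdown_table(current_rows, title=current_title))
--             # Start new chunk with header + category name
--             category = row[0].strip()
--             current_title = f"{title} — {category}"
--             current_rows = [header]
--         current_rows.append(row)
--
--     # Flush last chunk
--     if len(current_rows) > 1: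
--         chunks.append(_rows_to_markdown_table(current_rows, title=current_title))
--
--     # If splitting didn't produce meaningful chunks, return as one table
--     if len(chunks) <= 1:
--         return [_rows_to_markdown_table(rows, title=title)]
--
--     return chunks
-- ===== SOURCE B (Python) =====
-- _SPLIT_THRESHOLD = 50
--
-- def _rows_to_markdown_table(rows: list[list[str]], *, title: str = "") -> str:
--     """Convert a 2D list of strings to a Markdown table."""
--     if not rows:
--         return ""
--
--     parts: list[str] = []
--     if title:
--         parts.append(f"## {title}")
--         parts.append("")
--
--     col_count = max(len(r) for r in rows)
--     normalized = [r + [""] * (col_count - len(r)) for r in rows]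
--
--     header = normalized[0]
--     parts.append("| " + " | ".join(header) + " |")
--     parts.append("| " + " | ".join("---" for _ in header) + " |")
--
--     for row in normalized[1:]:
--         parts.append("| " + " | ".join(row) + " |")
--
--     return "\n".join(parts)
--
-- def _is_category_row(cells: list[str], col_count: int) -> bool:
--     """Detect if a row is a category/section header (mostly empty except first col)."""
--     if not cells or not cells[0].strip():
--         return False
--
--     non_empty = sum(1 for c in cells[1:] if c.strip())
--     return non_empty <= 1 and col_count > 2
--
-- def _smart_split_table(rows: list[list[str]], title: str) -> list[str]:
--     """Split a large table by category rows into smaller semantic chunks.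
--
--     Two-phase: first collect the boundary indices (category rows at index >= 2;
--     a category row at index 1 merely opens the first chunk and never splits),
--     then slice the row list at those boundaries and render each slice.
--     """
--     if len(rows) <= _SPLIT_THRESHOLD:
--         return [_rows_to_markdown_table(rows, title=title)]
--
--     col_count = max(len(r) for r in rows)
--     bounds = [i for i, r in enumerate(rows) if i >= 2 and _is_category_row(r, col_count)]
--     if not bounds:
--         return [_rows_to_markdown_table(rows, title=title)]
--
--     edges = [1] + bounds + [len(rows)]
--     return [
--         _rows_to_markdown_table(
--             [rows[0]] + rows[s:e],
--             title=title if s == 1 else f"{title} — {rows[s][0].strip()}",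
--         )
--         for s, e in zip(edges, edges[1:])
--     ]
-- ===== Notes on version B (the rewrite author's own statement) =====
-- stated objective: alternative
-- what changed: A's single accumulate-and-flush loop (mutable current_rows/current_title state) is replaced by a two-phase split: first collect the boundary indices (category rows at index >= 2), then slice the row list at consecutive boundary pairs and render each header-prepended slice with its title.
import Mathlib
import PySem

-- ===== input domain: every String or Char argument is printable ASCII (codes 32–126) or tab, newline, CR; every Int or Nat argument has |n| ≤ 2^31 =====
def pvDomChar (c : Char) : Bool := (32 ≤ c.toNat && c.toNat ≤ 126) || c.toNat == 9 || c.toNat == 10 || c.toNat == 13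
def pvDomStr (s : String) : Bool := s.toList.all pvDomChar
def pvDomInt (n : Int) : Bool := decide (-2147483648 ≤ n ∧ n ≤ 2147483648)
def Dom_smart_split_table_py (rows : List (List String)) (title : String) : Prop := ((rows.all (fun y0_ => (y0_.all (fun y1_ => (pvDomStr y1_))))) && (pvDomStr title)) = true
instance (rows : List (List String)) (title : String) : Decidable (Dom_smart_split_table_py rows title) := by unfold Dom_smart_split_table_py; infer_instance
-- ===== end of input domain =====

-- B replaces A's accumulate-and-flush loop by a two-phase split (collect boundary
-- indices first, then slice the row list and render each slice); same return value,
-- objective: alternative decomposition.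

-- ===== PORT A =====
-- shared module helpers (_rows_to_markdown_table, _is_category_row), used verbatim by A and B

-- max(len(r) for r in rows): lengths are ≥ 0, so the 0-seeded running max is exact
-- for the nonempty lists this is applied to
def pvColCount (rows : List (List String)) : Nat :=
  rows.foldl (fun m r => max m r.length) 0

def pvBarRow (row : List String) : String :=
  "| " ++ PySem.Str.join " | " row ++ " |"

-- _rows_to_markdown_table
def pvRender (rows : List (List String)) (title : String) : String :=
  if rows = [] then ""
  else
    let parts0 : List String := if title ≠ "" then ["## " ++ title, ""] else []
    let colCount := pvColCount rows
    let normalized := rows.map (fun r => r ++ List.replicate (colCount - r.length) "")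
    let header := normalized.headD []
    let parts := parts0 ++
      [pvBarRow header, pvBarRow (header.map (fun _ => "---"))] ++
      normalized.tail.map pvBarRow
    PySem.Str.join "\n" parts

-- _is_category_row
def pvIsCat (cells : List String) (colCount : Nat) : Bool :=
  match cells with
  | [] => false
  | c0 :: rest =>
    if PySem.Str.strip c0 = "" then false
    else decide ((rest.filter (fun c => PySem.Str.strip c ≠ "")).length ≤ 1) && decide (2 < colCount)

-- the body of A's for-loop (state: chunks × current_rows × current_title)
def pvStep (cat : List String → Bool) (header : List String) (title : String)
    (s : List String × List (List String) × String) (row : List String) :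
    List String × List (List String) × String :=
  if cat row && decide (1 < s.2.1.length) then
    (s.1 ++ [pvRender s.2.1 s.2.2],
     [header, row],
     -- row[0].strip(): row is nonempty whenever the category test holds, so headD is exact here
     title ++ " — " ++ PySem.Str.strip (row.headD ""))
  else (s.1, s.2.1 ++ [row], s.2.2)

def smart_split_table_py (rows : List (List String)) (title : String) : List String :=
  if rows.length ≤ 50 then [pvRender rows title]
  else
    let header := rows.headD []          -- rows[0]; rows ≠ [] here since len > 50
    let colCount := pvColCount rows
    let st := rows.tail.foldl (pvStep (fun row => pvIsCat row colCount) header title)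
      ([], [header], title)
    let chunks := if 1 < st.2.1.length then st.1 ++ [pvRender st.2.1 st.2.2] else st.1
    if chunks.length ≤ 1 then [pvRender rows title] else chunks

-- ===== PORT B =====
-- one chunk of B's final list comprehension: rows[0] prepended to rows[s:e], rendered
-- under the base title (s == 1) or the category title taken from rows[s]
def pvChunkOf (rows : List (List String)) (title : String) (se : Int × Int) : String :=
  pvRender ((rows.headD []) :: PySem.List.slice rows (some se.1) (some se.2))
    (if se.1 = 1 then title
     -- rows[s][0].strip(): every bound s satisfies 2 ≤ s < len(rows) and rows[s] is a
     -- (nonempty) category row, so pyGetD/headD are exact here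
     else title ++ " — " ++ PySem.Str.strip ((PySem.List.pyGetD rows se.1 []).headD ""))

def smart_split_table_py_alt (rows : List (List String)) (title : String) : List String :=
  if rows.length ≤ 50 then [pvRender rows title]
  else
    let colCount := pvColCount rows
    let bounds := ((PySem.List.enumerate rows 0).filter
        (fun p => decide (2 ≤ p.1) && pvIsCat p.2 colCount)).map (·.1)
    if bounds = [] then [pvRender rows title]
    else
      let edges := [(1:Int)] ++ bounds ++ [(rows.length : Int)]
      (edges.zip edges.tail).map (pvChunkOf rows title)

-- ===== PRECONDITION & SPEC =====
def Spec_smart_split_table_py (rows : List (List String)) (title : String) (out : List String) : Prop := out = smart_split_table_py_alt rows title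
instance (rows : List (List String)) (title : String) (out : List String) : Decidable (Spec_smart_split_table_py rows title out) := by unfold Spec_smart_split_table_py; infer_instance

-- ===== CLAIM (what is proved, stated in full; the proofs are below) =====
def Claim_equal_smart_split_table_py : Prop := ∀ (rows : List (List String)) (title : String), Dom_smart_split_table_py rows title → Spec_smart_split_table_py rows title (smart_split_table_py rows title)

-- ===== LEMMAS AND PROOFS =====

-- split a list at its category rows: (prefix before the first category row,
-- groups each led by a category row)
def pvChop (cat : List String → Bool) : List (List String) →
    List (List String) × List (List (List String))
  | [] => ([], [])
  | r :: m =>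
    let p := pvChop cat m
    if cat r then ([], (r :: p.1) :: p.2) else (r :: p.1, p.2)

-- absolute indices (counting from j) of the category rows of m
def pvCatIdx (cat : List String → Bool) (j : Nat) : List (List String) → List Nat
  | [] => []
  | r :: m => if cat r then j :: pvCatIdx cat (j + 1) m else pvCatIdx cat (j + 1) m

-- how each later chunk is rendered, as a function of its group of rows
def pvF (header : List String) (title : String) (g : List (List String)) : String :=
  pvRender (header :: g) (title ++ " — " ++ PySem.Str.strip ((g.headD []).headD ""))

-- B's chunk list, boundary pair by boundary pair
def pvPairs (rows : List (List String)) (title : String) : Int → List Nat → List String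
  | s, [] => [pvChunkOf rows title (s, (rows.length : Int))]
  | s, b :: bs => pvChunkOf rows title (s, (b : Int)) :: pvPairs rows title (b : Int) bs

theorem pvCatIdx_nil_iff (cat : List String → Bool) (m : List (List String)) :
    ∀ j : Nat, (pvCatIdx cat j m = [] ↔ (pvChop cat m).2 = []) := by
  induction m with
  | nil => intro j; simp [pvCatIdx, pvChop]
  | cons r m ih =>
    intro j
    by_cases h : cat r <;> simp [pvCatIdx, pvChop, h, ih]

theorem pv_enum_filter (cat : List String → Bool) (m : List (List String)) :
    ∀ j : Nat, 2 ≤ j →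
      ((PySem.List.enumerate m (j : Int)).filter
          (fun p => decide (2 ≤ p.1) && cat p.2)).map (·.1)
        = List.map (fun (k : Nat) => (k : Int)) (pvCatIdx cat j m) := by
  induction m with
  | nil => intro j _; simp [PySem.List.enumerate_nil, pvCatIdx]
  | cons r m ih =>
    intro j hj
    have h2 : (decide ((2:Int) ≤ (j : Int)) && cat r) = cat r := by
      have hx : ((2:Int) ≤ (j : Int)) := by exact_mod_cast hj
      simp [hx]
    have hj1 : ((j:Int) + 1) = ((j+1 : Nat) : Int) := by push_cast; ring
    rw [PySem.List.enumerate_cons, List.filter_cons]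
    simp only [h2, hj1]
    by_cases h : cat r
    · rw [if_pos h]
      simp only [List.map_cons, ih (j+1) (by omega)]
      simp [pvCatIdx, h]
    · rw [if_neg h]
      rw [ih (j+1) (by omega)]
      simp [pvCatIdx, h]

-- A's loop, characterised through pvChop: the flushed chunks are the rendered groups
theorem pv_foldA (cat : List String → Bool) (header : List String) (title : String)
    (m : List (List String)) :
    ∀ (c : List String) (seg : List (List String)) (t : String), seg ≠ [] →
      (if 1 < (m.foldl (pvStep cat header title) (c, header :: seg, t)).2.1.length then
          (m.foldl (pvStep cat header title) (c, header :: seg, t)).1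
            ++ [pvRender (m.foldl (pvStep cat header title) (c, header :: seg, t)).2.1
                  (m.foldl (pvStep cat header title) (c, header :: seg, t)).2.2]
        else (m.foldl (pvStep cat header title) (c, header :: seg, t)).1)
      = c ++ pvRender (header :: (seg ++ (pvChop cat m).1)) t ::
          (pvChop cat m).2.map (pvF header title) := by
  induction m with
  | nil =>
    intro c seg t hseg
    have hlen : 1 < (header :: seg).length := by
      cases seg with
      | nil => exact absurd rfl hseg
      | cons a b => simp
    simp [List.foldl, pvChop, hseg]
  | cons r m ih =>
    intro c seg t hseg
    rw [List.foldl_cons]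
    by_cases h : cat r
    · have hstep : pvStep cat header title (c, header :: seg, t) r
          = (c ++ [pvRender (header :: seg) t], header :: [r],
             title ++ " — " ++ PySem.Str.strip (r.headD "")) := by
        simp [pvStep, h, hseg]
      rw [hstep, ih _ [r] _ (by simp)]
      simp [pvChop, h, pvF]
    · have hstep : pvStep cat header title (c, header :: seg, t) r
          = (c, header :: (seg ++ [r]), t) := by
        simp [pvStep, h]
      rw [hstep, ih _ (seg ++ [r]) _ (by simp)]
      simp [pvChop, h]

-- B's zip over consecutive edges is the pair-by-pair recursion pvPairs
theorem pv_zip_pairs (rows : List (List String)) (title : String) (bs : List Nat) :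
    ∀ s : Int,
      ((([s] ++ List.map (fun (k : Nat) => (k : Int)) bs ++ [(rows.length : Int)]).zip
          (([s] ++ List.map (fun (k : Nat) => (k : Int)) bs ++ [(rows.length : Int)]).tail)).map
        (pvChunkOf rows title))
        = pvPairs rows title s bs := by
  induction bs with
  | nil => intro s; show [pvChunkOf rows title (s, (rows.length : Int))] = _; simp [pvPairs]
  | cons b bs ih =>
    intro s
    show _ = pvChunkOf rows title (s, (b:Int)) :: pvPairs rows title (b:Int) bs
    rw [← ih (b:Int)]
    rfl

-- B's chunks, characterised through pvChop: slicing at the category boundaries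
-- yields exactly the groups (rows[s:j] carried as drop/take)
theorem pv_pairs_chop (cat : List String → Bool) (rows : List (List String))
    (header : List String) (title : String) (hh : rows.headD [] = header)
    (m : List (List String)) :
    ∀ (j s : Nat), rows.drop j = m → 2 ≤ j → 1 ≤ s → s ≤ j →
      pvPairs rows title (s : Int) (pvCatIdx cat j m)
        = pvRender (header :: ((rows.drop s).take (j - s) ++ (pvChop cat m).1))
            (if (s:Int) = 1 then title
             else title ++ " — " ++ PySem.Str.strip ((PySem.List.pyGetD rows (s:Int) []).headD ""))
          :: (pvChop cat m).2.map (pvF header title) := by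
  induction m with
  | nil =>
    intro j s hdrop h2j h1 hsj
    have hjlen : rows.length ≤ j := by
      have := congrArg List.length hdrop; simp at this; omega
    have ht1 : (rows.drop s).take (j - s) = rows.drop s :=
      List.take_of_length_le (by simp; omega)
    have ht2 : (rows.drop s).take (rows.length - s) = rows.drop s :=
      List.take_of_length_le (by simp)
    simp only [pvCatIdx, pvPairs, pvChunkOf, PySem.List.slice_natCast, hh, pvChop,
      List.map_nil, ht1, ht2, List.append_nil]
  | cons r m ih =>
    intro j s hdrop h2j h1 hsj
    have hjlen : j < rows.length := by
      have := congrArg List.length hdrop; simp at this; omega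
    have hget : rows[j]? = some r := by
      have h0 : (rows.drop j)[0]? = some r := by rw [hdrop]; rfl
      simpa using h0
    have hdrop' : rows.drop (j + 1) = m := by
      have h0 : rows.drop (j + 1) = (rows.drop j).drop 1 := by
        rw [List.drop_drop]
      rw [h0, hdrop]; rfl
    by_cases h : cat r
    · have hgetD : PySem.List.pyGetD rows ((j:Nat):Int) [] = r := by
        rw [PySem.List.pyGetD_natCast]
        simp [List.getD, hget]
      have hne : ¬ (((j:Nat):Int) = 1) := by
        intro hc
        have : (j : Nat) = 1 := by exact_mod_cast hc
        omega
      have htake1 : (rows.drop j).take (j + 1 - j) = [r] := by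
        have : j + 1 - j = 1 := by omega
        rw [this, hdrop]; rfl
      simp only [pvCatIdx, if_pos h, pvPairs]
      rw [ih (j+1) j hdrop' (by omega) (by omega) (by omega)]
      simp only [htake1, hgetD, if_neg hne]
      simp only [pvChunkOf, PySem.List.slice_natCast, hh, pvChop, if_pos h]
      simp [pvF]
    · have htake1 : (rows.drop s).take (j + 1 - s) = (rows.drop s).take (j - s) ++ [r] := by
        have hidx : (rows.drop s)[j - s]? = some r := by
          rw [List.getElem?_drop]
          have hsum : s + (j - s) = j := by omega
          rw [hsum, hget]
        have hsucc : j + 1 - s = (j - s) + 1 := by omega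
        rw [hsucc, List.take_add_one, hidx]
        rfl
      simp only [pvCatIdx, if_neg h]
      rw [ih (j+1) s hdrop' (by omega) h1 (by omega)]
      rw [htake1]
      simp [pvChop, h, List.append_assoc]

theorem smart_split_table_py_spec : Claim_equal_smart_split_table_py := by
  intro rows title _
  unfold Spec_smart_split_table_py
  by_cases hlen : rows.length ≤ 50
  · simp [smart_split_table_py, smart_split_table_py_alt, hlen]
  · match rows with
    | [] => simp at hlen
    | [h] => simp at hlen
    | h :: r0 :: lr =>
      have hchop2 := pvCatIdx_nil_iff (fun row => pvIsCat row (pvColCount (h::r0::lr))) lr 2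
      have hstep0 : pvStep (fun row => pvIsCat row (pvColCount (h::r0::lr))) h title
          ([], [h], title) r0 = ([], h :: [r0], title) := by
        simp [pvStep]
      have hfold := pv_foldA (fun row => pvIsCat row (pvColCount (h::r0::lr))) h title lr
        [] [r0] title (by simp)
      have henum := pv_enum_filter (fun row => pvIsCat row (pvColCount (h::r0::lr))) lr 2
        (by omega)
      have hbounds : (((PySem.List.enumerate (h::r0::lr) (0:Int)).filter
            (fun p => decide ((2:Int) ≤ p.1) && pvIsCat p.2 (pvColCount (h::r0::lr)))).map (·.1))
          = List.map (fun (k : Nat) => (k : Int))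
              (pvCatIdx (fun row => pvIsCat row (pvColCount (h::r0::lr))) 2 lr) := by
        rw [PySem.List.enumerate_cons, PySem.List.enumerate_cons]
        rw [List.filter_cons, List.filter_cons]
        have e1 : (decide ((2:Int) ≤ (0:Int)) && pvIsCat h (pvColCount (h::r0::lr))) = false := by
          norm_num
        have e2 : (decide ((2:Int) ≤ (0:Int)+1) && pvIsCat r0 (pvColCount (h::r0::lr))) = false := by
          norm_num
        rw [e1, e2]
        have e3 : ((0:Int) + 1 + 1) = ((2:Nat):Int) := by norm_num
        rw [e3]
        exact henum
      simp only [smart_split_table_py, smart_split_table_py_alt, if_neg hlen,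
        List.headD_cons, List.tail_cons, List.foldl_cons]
      rw [hstep0, hfold, hbounds]
      by_cases hnil : pvCatIdx (fun row => pvIsCat row (pvColCount (h::r0::lr))) 2 lr = []
      · rw [hnil, hchop2.mp hnil]
        simp
      · have h2 : (pvChop (fun row => pvIsCat row (pvColCount (h::r0::lr))) lr).2 ≠ [] :=
          fun hc => hnil (hchop2.mpr hc)
        have hbne : List.map (fun (k : Nat) => (k : Int))
            (pvCatIdx (fun row => pvIsCat row (pvColCount (h::r0::lr))) 2 lr) ≠ [] := by
          simp only [ne_eq, List.map_eq_nil_iff]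
          exact hnil
        rw [if_neg hbne]
        have hzip := pv_zip_pairs (h::r0::lr) title
          (pvCatIdx (fun row => pvIsCat row (pvColCount (h::r0::lr))) 2 lr) (1:Int)
        rw [hzip]
        have hpairs := pv_pairs_chop (fun row => pvIsCat row (pvColCount (h::r0::lr)))
          (h::r0::lr) h title rfl lr 2 1 rfl (by omega) (by omega) (by omega)
        rw [Nat.cast_one] at hpairs
        rw [hpairs]
        simp [h2]
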